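-- pv_equiv track=rewrite | github.com/marcosgqrz/agentes_livi.ai | src/orchestrator.py | _consolidate_outputs
-- ===== SOURCE A (Python) =====
-- from typing import Dict, List, Any
--
-- def _consolidate_outputs(outputs: Dict[str, str]) -> str:
--     """Consolida todos os outputs em um documento final."""
--     sections = []
--
--     # Ordem lógica de apresentação
--     order = [
--         "brand_designer", "ux_designer", "ux_writer", "ui_designer",
--         "tech_lead", "frontend_dev", "backend_dev", "mobile_dev",
--         "qa_engineer", "devops_engineer"
--     ]
--
--     for agent_name in order:
--         if agent_name in outputs:
--             title = agent_name.replace("_", " ").title()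
--             sections.append(f"{'='*70}\n## {title}\n{'='*70}\n\n{outputs[agent_name]}")
--
--     # Adiciona agentes não listados na ordem
--     for agent_name, output in outputs.items():
--         if agent_name not in order:
--             title = agent_name.replace("_", " ").title()
--             sections.append(f"{'='*70}\n## {title}\n{'='*70}\n\n{output}")
--
--     return "\n\n".join(sections)
-- ===== SOURCE B (Python) =====
-- def _consolidate_outputs(outputs):
--     """Consolida todos os outputs em um documento final."""
--     order = [
--         "brand_designer", "ux_designer", "ux_writer", "ui_designer",
--         "tech_lead", "frontend_dev", "backend_dev", "mobile_dev",
--         "qa_engineer", "devops_engineer"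
--     ]
--     n = len(order)
--     # bucket every item by its rank in `order` (rank n = not listed), one pass
--     buckets = [[] for _ in range(n + 1)]
--     for name, output in outputs.items():
--         r = order.index(name) if name in order else n
--         buckets[r].append((name, output))
--     bar = "=" * 70
--     sections = [f"{bar}\n## {name.replace('_', ' ').title()}\n{bar}\n\n{output}"
--                 for bucket in buckets for name, output in bucket]
--     return "\n\n".join(sections)
-- ===== Notes on version B (the rewrite author's own statement) =====
-- stated objective: alternative
-- what changed: B replaces A's two specialized passes (a scan over the order list with a dict lookup per hit, then a scan over the dict skipping listed agents) by a single bucket-sort pass that drops every item into its rank's bucket, followed by one uniform formatting pass over the concatenated buckets.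
import Mathlib
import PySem

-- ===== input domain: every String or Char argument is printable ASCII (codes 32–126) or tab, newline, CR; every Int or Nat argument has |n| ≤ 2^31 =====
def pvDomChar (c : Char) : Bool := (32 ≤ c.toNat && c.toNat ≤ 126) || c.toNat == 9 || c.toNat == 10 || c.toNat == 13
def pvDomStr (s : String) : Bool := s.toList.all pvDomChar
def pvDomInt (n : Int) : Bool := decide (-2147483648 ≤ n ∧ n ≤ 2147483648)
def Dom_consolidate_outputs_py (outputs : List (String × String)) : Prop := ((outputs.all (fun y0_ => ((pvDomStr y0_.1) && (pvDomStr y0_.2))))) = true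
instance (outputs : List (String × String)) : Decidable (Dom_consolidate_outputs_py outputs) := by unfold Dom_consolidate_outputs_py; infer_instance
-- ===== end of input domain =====

-- B replaces A's two membership-scanning passes by a one-pass bucket sort on the agent's
-- rank in the section order followed by one uniform formatting pass (objective: alternative).

-- the `order` list both Python sources write out literally
def pvOrder : List String :=
  ["brand_designer", "ux_designer", "ux_writer", "ui_designer",
   "tech_lead", "frontend_dev", "backend_dev", "mobile_dev",
   "qa_engineer", "devops_engineer"]

-- hand port of str.title(): a letter after a non-letter is uppercased, other letters
-- lowercased (exact on the ASCII domain, where Python's "cased" = isalpha)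
def pvTitleGo (prevAlpha : Bool) : List Char → List Char
  | [] => []
  | c :: cs =>
    if PySem.Chars.isalpha c then
      (if prevAlpha then PySem.Chars.lowerChar c else PySem.Chars.upperChar c) :: pvTitleGo true cs
    else c :: pvTitleGo false cs

-- the f-string both sources build: f"{'='*70}\n## {title}\n{'='*70}\n\n{out}"
def pvFmt (name out : String) : String :=
  let bar := PySem.List.pyRepeat ['='] 70
  let title := pvTitleGo false (PySem.Str.replace name "_" " ").toList
  String.ofList (bar ++ '\n' :: '#' :: '#' :: ' ' :: (title ++ '\n' :: (bar ++ '\n' :: '\n' :: out.toList)))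

-- ===== PORT A =====
def consolidate_outputs_py (outputs : List (String × String)) : String :=
  let sections :=
    pvOrder.foldl (fun acc name =>
      if (outputs.map Prod.fst).contains name then
        acc ++ [pvFmt name (((outputs.find? (fun p => p.1 == name)).map Prod.snd).getD "")]
      else acc) []
  let sections :=
    outputs.foldl (fun acc kv =>
      if !(pvOrder.contains kv.1) then acc ++ [pvFmt kv.1 kv.2] else acc) sections
  PySem.Str.join "\n\n" sections

-- ===== PORT B =====
def consolidate_outputs_py_alt (outputs : List (String × String)) : String :=
  let n := pvOrder.length
  let buckets : List (List (String × String)) := List.replicate (n + 1) []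
  let buckets :=
    outputs.foldl (fun bs kv =>
      let r := if pvOrder.contains kv.1 then pvOrder.idxOf kv.1 else n
      bs.modify r (fun b => b ++ [kv])) buckets
  let sections := buckets.flatMap (fun b => b.map (fun kv => pvFmt kv.1 kv.2))
  PySem.Str.join "\n\n" sections

-- ===== PRECONDITION & SPEC =====
-- Pre_ requires distinct keys: the argument is a Python dict (unique keys); association
-- lists with duplicated keys represent no dict, so nothing is claimed about them.
def Pre_consolidate_outputs_py (outputs : List (String × String)) : Prop :=
  (outputs.map Prod.fst).Nodup
instance (outputs : List (String × String)) : Decidable (Pre_consolidate_outputs_py outputs) := by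
  unfold Pre_consolidate_outputs_py; infer_instance

def pvWitness_consolidate_outputs_py : (List (String × String)) :=
  [("ux_designer", "wireframes"), ("extra_agent", "notes"), ("brand_designer", "logo")]

def Spec_consolidate_outputs_py (outputs : List (String × String)) (out : String) : Prop := out = consolidate_outputs_py_alt outputs
instance (outputs : List (String × String)) (out : String) : Decidable (Spec_consolidate_outputs_py outputs out) := by unfold Spec_consolidate_outputs_py; infer_instance

-- ===== CLAIM (what is proved, stated in full; the proofs are below) =====
def Claim_equal_consolidate_outputs_py : Prop := ∀ (outputs : List (String × String)), Dom_consolidate_outputs_py outputs → Pre_consolidate_outputs_py outputs → Spec_consolidate_outputs_py outputs (consolidate_outputs_py outputs)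

-- ===== LEMMAS AND PROOFS =====

-- the rank B's loop computes for a key
def pvRk (k : String) : Nat :=
  if pvOrder.contains k then pvOrder.idxOf k else pvOrder.length

lemma pvOrder_nodup : pvOrder.Nodup := by decide

-- with distinct keys, filtering by one key yields exactly the dict-lookup singleton
lemma pv_filter_key (outputs : List (String × String))
    (hnd : (outputs.map Prod.fst).Nodup) (name : String) :
    outputs.filter (fun p => p.1 == name) =
      (if (outputs.map Prod.fst).contains name then
        [(name, ((outputs.find? (fun p => p.1 == name)).map Prod.snd).getD "")]
      else []) := by
  induction outputs with
  | nil => simp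
  | cons kv t ih =>
    simp only [List.map_cons, List.nodup_cons] at hnd
    obtain ⟨hk, hnd'⟩ := hnd
    by_cases h : kv.1 = name
    · subst h
      have hfil : t.filter (fun p => p.1 == kv.1) = [] := by
        rw [List.filter_eq_nil_iff]
        intro a ha hbeq
        exact hk (List.mem_map.mpr ⟨a, ha, by simpa using hbeq⟩)
      simp [hfil]
    · have hb : (kv.1 == name) = false := by simpa using h
      have h' : ¬ name = kv.1 := fun e => h e.symm
      have hc : (kv.1 :: List.map Prod.fst t).contains name = (List.map Prod.fst t).contains name := by
        apply Bool.eq_iff_iff.mpr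
        simp [h']
      rw [List.filter_cons, List.find?_cons]
      simp only [hb, Bool.false_eq_true, if_false, List.map_cons]
      rw [ih hnd', hc]

-- the flatMap of per-key filters is A's first loop (a filter∘map over `order`)
lemma pv_flatMap_filter (ord : List String) (outputs : List (String × String))
    (hnd : (outputs.map Prod.fst).Nodup) :
    ord.flatMap (fun name => (outputs.filter (fun p => p.1 == name)).map (fun kv => pvFmt kv.1 kv.2))
      = (ord.filter (fun name => (outputs.map Prod.fst).contains name)).map
          (fun name => pvFmt name (((outputs.find? (fun p => p.1 == name)).map Prod.snd).getD "")) := by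
  induction ord with
  | nil => simp
  | cons name t ih =>
    rw [List.flatMap_cons, List.filter_cons, pv_filter_key outputs hnd name, ih]
    by_cases hc : (outputs.map Prod.fst).contains name
    · simp only [if_pos hc]
      simp
    · simp only [Bool.not_eq_true] at hc
      simp only [hc, Bool.false_eq_true, if_false]
      simp

-- modifying one slot of a table over range m
lemma pv_modify_map_range {α : Type} (m : Nat) (g : Nat → α) (r : Nat) (f : α → α) :
    ((List.range m).map g).modify r f = (List.range m).map (fun i => if r = i then f (g i) else g i) := by
  apply List.ext_getElem
  · simp [List.length_modify]
  · intro i h1 h2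
    simp only [List.length_modify, List.length_map, List.length_range] at h1
    rw [List.getElem_modify]
    simp [List.getElem_map, List.getElem_range]

-- B's bucket loop: bucket i collects, in input order, the items of rank i
lemma pv_fold_buckets (xs : List (String × String)) (g : Nat → List (String × String)) :
    xs.foldl (fun bs kv =>
        bs.modify (if pvOrder.contains kv.1 then pvOrder.idxOf kv.1 else pvOrder.length) (fun b => b ++ [kv]))
      ((List.range (pvOrder.length + 1)).map g)
      = (List.range (pvOrder.length + 1)).map (fun i => g i ++ xs.filter (fun p => pvRk p.1 == i)) := by
  induction xs generalizing g with
  | nil => simp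
  | cons kv t ih =>
    rw [List.foldl_cons, pv_modify_map_range, ih]
    apply List.map_congr_left
    intro i _
    by_cases hr : pvRk kv.1 = i
    · have : (if pvOrder.contains kv.1 then pvOrder.idxOf kv.1 else pvOrder.length) = i := hr
      rw [if_pos this]
      simp [hr]
    · have : (if pvOrder.contains kv.1 then pvOrder.idxOf kv.1 else pvOrder.length) ≠ i := hr
      rw [if_neg this]
      simp [hr]

-- rank i < 10 holds exactly for the key order[i]
lemma pv_rk_eq_iff (k : String) (i : Nat) (h : i < pvOrder.length) :
    (pvRk k == i) = (k == pvOrder.getD i "") := by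
  apply Bool.eq_iff_iff.mpr
  simp only [beq_iff_eq]
  unfold pvRk
  constructor
  · intro hrk
    by_cases hc : pvOrder.contains k
    · rw [if_pos hc] at hrk
      have hm : k ∈ pvOrder := List.contains_iff_mem.mp hc
      have hlt : pvOrder.idxOf k < pvOrder.length := List.idxOf_lt_length_of_mem hm
      have hg := List.getElem_idxOf (x := k) (xs := pvOrder) hlt
      subst hrk
      rw [List.getD_eq_getElem?_getD, List.getElem?_eq_getElem h, Option.getD_some]
      exact hg.symm
    · rw [if_neg hc] at hrk; omega
  · intro hk
    have hget : pvOrder.getD i "" = pvOrder[i] := by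
      rw [List.getD_eq_getElem?_getD, List.getElem?_eq_getElem h, Option.getD_some]
    rw [hget] at hk
    subst hk
    have hm : pvOrder[i] ∈ pvOrder := List.getElem_mem h
    rw [if_pos (List.contains_iff_mem.mpr hm)]
    exact List.Nodup.idxOf_getElem pvOrder_nodup i h

-- rank 10 holds exactly for keys not listed in `order`
lemma pv_rk_last (k : String) : (pvRk k == pvOrder.length) = !(pvOrder.contains k) := by
  apply Bool.eq_iff_iff.mpr
  simp only [beq_iff_eq, Bool.not_eq_eq_eq_not, Bool.not_true]
  unfold pvRk
  by_cases hc : pvOrder.contains k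
  · rw [if_pos hc]
    have hlt : pvOrder.idxOf k < pvOrder.length :=
      List.idxOf_lt_length_of_mem (List.contains_iff_mem.mp hc)
    constructor
    · intro he; omega
    · intro he; rw [hc] at he; cases he
  · rw [if_neg hc]
    simp only [Bool.not_eq_true] at hc
    simp only [hc]

-- flatMap over the index range equals flatMap over the list itself
lemma pv_flatMap_range {α β : Type} (l : List α) (d : α) (h : α → List β) :
    (List.range l.length).flatMap (fun i => h (l.getD i d)) = l.flatMap h := by
  induction l using List.reverseRecOn with
  | nil => simp
  | append_singleton l a ih =>
    have hl : (l ++ [a]).length = l.length + 1 := by simp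
    rw [hl, List.range_succ, List.flatMap_append, List.flatMap_append]
    congr 1
    · rw [← ih, List.flatMap_def, List.flatMap_def]
      congr 1
      apply List.map_congr_left
      intro i hi
      have hil : i < l.length := List.mem_range.mp hi
      rw [List.getD_eq_getElem?_getD, List.getD_eq_getElem?_getD, List.getElem?_append_left hil]
    · rw [List.flatMap_cons, List.flatMap_nil, List.flatMap_cons, List.flatMap_nil]
      rw [List.getD_eq_getElem?_getD, List.getElem?_append_right (le_refl l.length)]
      simp

-- ===== VERDICT (by name: the statement is the Claim_ definition above) =====
theorem consolidate_outputs_py_spec : Claim_equal_consolidate_outputs_py := by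
  intro outputs _hd hnd
  unfold Pre_consolidate_outputs_py at hnd
  unfold Spec_consolidate_outputs_py
  simp only [consolidate_outputs_py, consolidate_outputs_py_alt]
  -- A's two loops as filter/map
  rw [PySem.List.foldl_append_if (fun name => (outputs.map Prod.fst).contains name)
        (fun name => pvFmt name (((outputs.find? (fun p => p.1 == name)).map Prod.snd).getD "")) pvOrder []]
  rw [PySem.List.foldl_append_if (fun kv => !(pvOrder.contains kv.1)) (fun kv => pvFmt kv.1 kv.2) outputs]
  -- B's buckets as a table of filters
  have hrep : (List.replicate (pvOrder.length + 1) ([] : List (String × String)))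
      = (List.range (pvOrder.length + 1)).map (fun _ => []) := by
    apply List.ext_getElem <;> simp
  rw [hrep, pv_fold_buckets outputs (fun _ => [])]
  simp only [List.nil_append]
  rw [List.flatMap_map]
  rw [List.range_succ, List.flatMap_append, List.flatMap_cons, List.flatMap_nil, List.append_nil]
  congr 1
  -- the ordered sections
  have h1 : (List.range pvOrder.length).flatMap
        (fun i => (outputs.filter (fun p => pvRk p.1 == i)).map (fun kv => pvFmt kv.1 kv.2))
      = (List.range pvOrder.length).flatMap
        (fun i => ((fun name => (outputs.filter (fun p => p.1 == name)).map (fun kv => pvFmt kv.1 kv.2)) (pvOrder.getD i ""))) := by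
    rw [List.flatMap_def, List.flatMap_def]
    congr 1
    apply List.map_congr_left
    intro i hi
    congr 1
    apply List.filter_congr
    intro p _
    exact pv_rk_eq_iff p.1 i (List.mem_range.mp hi)
  rw [h1, pv_flatMap_range pvOrder ""
        (fun name => (outputs.filter (fun p => p.1 == name)).map (fun kv => pvFmt kv.1 kv.2)),
      pv_flatMap_filter pvOrder outputs hnd]
  -- the leftover sections
  have h2 : outputs.filter (fun kv => !pvOrder.contains kv.1)
      = outputs.filter (fun p => pvRk p.1 == pvOrder.length) :=
    List.filter_congr (fun p _ => (pv_rk_last p.1).symm)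
  rw [h2]
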